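-- pv_equiv track=rewrite | github.com/Koaha/frequency_resonance | src/core/signal_processing/processor.py | _build_per_window_quality
-- ===== SOURCE A (Python) =====
-- from typing import Any, Dict, List
--
-- def _build_per_window_quality(
--     all_sqi: Dict[str, Any], n_windows: int
-- ) -> List[Dict[str, str]]:
--     """Create a list (one entry per window index) mapping SQI name → quality."""
--     per_window: List[Dict[str, str]] = [{} for _ in range(n_windows)]
--     for sqi_name, sqi_data in all_sqi.items():
--         qualities = sqi_data.get("quality")
--         if not qualities:
--             continue
--         for i, q in enumerate(qualities):
--             if i < n_windows:
--                 per_window[i][sqi_name] = q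
--     return per_window
-- ===== SOURCE B (Python) =====
-- from typing import Any, Dict, List
--
--
-- def _build_per_window_quality(
--     all_sqi: Dict[str, Any], n_windows: int
-- ) -> List[Dict[str, str]]:
--     """Window-major pass over a shrinking list of still-active (name, qualities) pairs."""
--     active = [
--         (sqi_name, sqi_data["quality"])
--         for sqi_name, sqi_data in all_sqi.items()
--         if sqi_data.get("quality")
--     ]
--     per_window: List[Dict[str, str]] = []
--     for i in range(n_windows):
--         active = [(name, qs) for name, qs in active if i < len(qs)]
--         per_window.append({name: qs[i] for name, qs in active})
--     return per_window
-- ===== Notes on version B (the rewrite author's own statement) =====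
-- stated objective: alternative
-- what changed: A does an SQI-major pass, mutating a pre-built list of per-window dicts via enumerate(qualities); B does a window-major pass that keeps a shrinking 'active' list of (name, qualities) pairs still long enough for the current window and builds each window's dict from it.
import Mathlib
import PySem

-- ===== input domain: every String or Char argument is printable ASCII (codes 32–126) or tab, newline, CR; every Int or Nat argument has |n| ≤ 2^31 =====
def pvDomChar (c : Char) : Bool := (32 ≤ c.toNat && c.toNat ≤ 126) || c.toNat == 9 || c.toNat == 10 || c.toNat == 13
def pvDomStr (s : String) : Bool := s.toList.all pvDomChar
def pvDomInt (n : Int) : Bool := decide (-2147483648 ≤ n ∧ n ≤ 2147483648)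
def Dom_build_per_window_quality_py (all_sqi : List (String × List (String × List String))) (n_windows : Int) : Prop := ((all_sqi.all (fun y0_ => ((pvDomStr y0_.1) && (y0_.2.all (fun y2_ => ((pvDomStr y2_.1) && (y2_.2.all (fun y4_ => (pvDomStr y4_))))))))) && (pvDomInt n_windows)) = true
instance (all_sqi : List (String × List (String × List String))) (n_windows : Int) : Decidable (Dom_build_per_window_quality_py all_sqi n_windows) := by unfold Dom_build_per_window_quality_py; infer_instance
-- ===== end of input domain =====

-- B replaces A's SQI-major pass (mutating a pre-built list of window dicts) by a
-- window-major pass that keeps a shrinking list of still-active (name, qualities)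
-- pairs and builds each window's dict from it (objective: alternative; same cost).

-- ===== PORT A =====
-- A-side helpers: the two loop bodies of A.
-- inner loop body: "for i, q in enumerate(qualities): if i < n_windows: per_window[i][sqi_name] = q"
def pvInnerStep (n : Int) (name : String) (pw : List (PySem.Dict String String)) (iq : Int × String) : List (PySem.Dict String String) :=
  if iq.1 < n then pw.modify iq.1.toNat (fun d => d.insert name iq.2) else pw

-- outer loop body over one (sqi_name, sqi_data) item; .get("quality") is first-match lookup
def pvOuterStep (n : Int) (pw : List (PySem.Dict String String)) (x : String × List (String × List String)) : List (PySem.Dict String String) :=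
  match x.2.lookup "quality" with
  | none => pw        -- "if not qualities: continue" (missing key)
  | some qualities =>
    if qualities = [] then pw   -- "if not qualities: continue" (empty list)
    else (PySem.List.enumerate qualities 0).foldl (pvInnerStep n x.1) pw

-- per-window dicts are PySem.Dict (overwrite keeps position), returned as items lists
def build_per_window_quality_py (all_sqi : List (String × List (String × List String))) (n_windows : Int) : List (List (String × String)) :=
  let per_window0 : List (PySem.Dict String String) :=
    (PySem.List.pyRange 0 n_windows 1).map (fun _ => PySem.Dict.empty)
  (all_sqi.foldl (pvOuterStep n_windows) per_window0).map PySem.Dict.items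

-- ===== PORT B =====
-- B-side helpers.
-- the initial comprehension: [(name, data["quality"]) for name, data in all_sqi.items() if data.get("quality")]
def pvActive0 (all_sqi : List (String × List (String × List String))) : List (String × List String) :=
  all_sqi.filterMap (fun x =>
    match x.2.lookup "quality" with
    | some qs => if qs = [] then none else some (x.1, qs)
    | none => none)

-- one iteration of the window loop: shrink `active` to i < len(qs), then build window i's dict.
-- qs[i] is ported as pyGetD with default "": the filter guarantees 0 ≤ i < len(qs), so the
-- default is never used and the port is exact.
def pvBStep (s : List (String × List String) × List (List (String × String))) (i : Int) : List (String × List String) × List (List (String × String)) :=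
  let active := s.1.filter (fun p => decide (i < (p.2.length : Int)))
  (active, s.2 ++ [(active.foldl (fun d p => d.insert p.1 (PySem.List.pyGetD p.2 i "")) PySem.Dict.empty).items])

def build_per_window_quality_py_alt (all_sqi : List (String × List (String × List String))) (n_windows : Int) : List (List (String × String)) :=
  ((PySem.List.pyRange 0 n_windows 1).foldl pvBStep (pvActive0 all_sqi, [])).2

-- ===== PRECONDITION & SPEC =====
def Spec_build_per_window_quality_py (all_sqi : List (String × List (String × List String))) (n_windows : Int) (out : List (List (String × String))) : Prop := out = build_per_window_quality_py_alt all_sqi n_windows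
instance (all_sqi : List (String × List (String × List String))) (n_windows : Int) (out : List (List (String × String))) : Decidable (Spec_build_per_window_quality_py all_sqi n_windows out) := by unfold Spec_build_per_window_quality_py; infer_instance

-- ===== CLAIM (what is proved, stated in full; the proofs are below) =====
def Claim_equal_build_per_window_quality_py : Prop := ∀ (all_sqi : List (String × List (String × List String))) (n_windows : Int), Dom_build_per_window_quality_py all_sqi n_windows → Spec_build_per_window_quality_py all_sqi n_windows (build_per_window_quality_py all_sqi n_windows)

-- ===== LEMMAS AND PROOFS =====

/-- Effect of one SQI entry on the window-`k` dict (both ports fold this, per window). -/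
def pvG (k : Nat) (d : PySem.Dict String String) (x : String × List (String × List String)) : PySem.Dict String String :=
  match x.2.lookup "quality" with
  | some qs => if k < qs.length then d.insert x.1 (qs.getD k "") else d
  | none => d

theorem pvInner_len (n : Int) (name : String) :
    ∀ (qs : List String) (s : Int) (pw : List (PySem.Dict String String)),
    ((PySem.List.enumerate qs s).foldl (pvInnerStep n name) pw).length = pw.length := by
  intro qs
  induction qs with
  | nil => intro s pw; simp [PySem.List.enumerate]
  | cons q qs ih =>
    intro s pw
    rw [PySem.List.enumerate_cons, List.foldl_cons, ih]
    unfold pvInnerStep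
    split_ifs <;> simp

theorem pvOuter_len (n : Int) :
    ∀ (L : List (String × List (String × List String))) (pw : List (PySem.Dict String String)),
    (L.foldl (pvOuterStep n) pw).length = pw.length := by
  intro L
  induction L with
  | nil => intro pw; rfl
  | cons x L ih =>
    intro pw
    rw [List.foldl_cons, ih]
    unfold pvOuterStep
    cases x.2.lookup "quality" with
    | none => rfl
    | some qs =>
      dsimp only
      split_ifs
      · rfl
      · exact pvInner_len n x.1 qs 0 pw

theorem pvInner_get (n : Int) (name : String) :
    ∀ (qs : List String) (s : Nat) (pw : List (PySem.Dict String String)) (k : Nat),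
    ((PySem.List.enumerate qs (s : Int)).foldl (pvInnerStep n name) pw)[k]? =
      if s ≤ k ∧ k - s < qs.length ∧ (k : Int) < n
      then pw[k]?.map (fun d => d.insert name (qs.getD (k - s) ""))
      else pw[k]? := by
  intro qs
  induction qs with
  | nil =>
    intro s pw k
    simp [PySem.List.enumerate]
  | cons q qs ih =>
    intro s pw k
    rw [PySem.List.enumerate_cons]
    have hcast : (s : Int) + 1 = ((s + 1 : Nat) : Int) := by push_cast; ring
    rw [List.foldl_cons, hcast, ih (s + 1)]
    have hpw' : (pvInnerStep n name pw ((s : Int), q))[k]? =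
        if (s : Int) < n ∧ s = k then pw[k]?.map (fun d => d.insert name q) else pw[k]? := by
      unfold pvInnerStep
      by_cases hn : (s : Int) < n
      · rw [if_pos hn, List.getElem?_modify]
        simp only [Int.toNat_natCast]
        by_cases hk : s = k
        · subst hk; simp [hn]
        · simp only [hn, hk, true_and, if_false]
          cases pw[k]? <;> simp
      · rw [if_neg hn]
        simp [hn]
    rw [hpw']
    by_cases hk : s = k
    · subst hk
      simp only [show ¬ (s + 1 ≤ s) by omega, false_and, if_false]
      by_cases hn : (s : Int) < n
      · simp [hn]
      · simp [hn]
    · simp only [show ((s : Int) < n ∧ s = k) = False by simp [hk], if_false]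
      by_cases hc : s + 1 ≤ k ∧ k - (s + 1) < qs.length ∧ (k : Int) < n
      · rw [if_pos hc, if_pos (by constructor; omega; constructor; simp; omega; exact hc.2.2)]
        have hg : (q :: qs).getD (k - s) "" = qs.getD (k - (s + 1)) "" := by
          rw [show k - s = (k - (s + 1)) + 1 by omega]
          simp
        simp only [hg]
      · rw [if_neg hc, if_neg ?hneg]
        case hneg =>
          rintro ⟨h1, h2, h3⟩
          simp at h2
          exact hc ⟨by omega, by omega, h3⟩

theorem pvOuter_get (n : Int) :
    ∀ (L : List (String × List (String × List String))) (pw : List (PySem.Dict String String)) (k : Nat),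
    (k : Int) < n →
    (L.foldl (pvOuterStep n) pw)[k]? = pw[k]?.map (fun d => L.foldl (pvG k) d) := by
  intro L
  induction L with
  | nil => intro pw k _; simp
  | cons x L ih =>
    intro pw k hk
    rw [List.foldl_cons, ih _ k hk]
    have hstep : (pvOuterStep n pw x)[k]? = pw[k]?.map (fun d => pvG k d x) := by
      unfold pvOuterStep pvG
      cases hq : x.2.lookup "quality" with
      | none => cases pw[k]? <;> rfl
      | some qs =>
        dsimp only
        by_cases hnil : qs = []
        · subst hnil
          simp
        · rw [if_neg hnil]
          have h0 := pvInner_get n x.1 qs 0 pw k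
          rw [Nat.cast_zero] at h0
          rw [h0]
          simp only [Nat.zero_le, Nat.sub_zero, true_and]
          by_cases hlen : k < qs.length
          · rw [if_pos ⟨hlen, hk⟩]
            cases pw[k]? <;> simp [hlen]
          · rw [if_neg (fun h => hlen h.1)]
            cases pw[k]? <;> simp [hlen]
    rw [hstep]
    cases pw[k]? <;> rfl

/-- Folding window `k`'s dict from the filtered active list = folding `pvG k` over `all_sqi`. -/
theorem pvDict_eq (k : Nat) :
    ∀ (L : List (String × List (String × List String))) (d : PySem.Dict String String),
    ((pvActive0 L).filter (fun p => decide (k + 1 ≤ p.2.length))).foldl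
        (fun d p => d.insert p.1 (PySem.List.pyGetD p.2 (k : Int) "")) d =
      L.foldl (pvG k) d := by
  intro L
  induction L with
  | nil => intro d; rfl
  | cons x L ih =>
    intro d
    rw [List.foldl_cons]
    unfold pvActive0 pvG
    rw [List.filterMap_cons]
    cases hq : x.2.lookup "quality" with
    | none => exact ih d
    | some qs =>
      dsimp only
      by_cases hnil : qs = []
      · subst hnil
        rw [if_pos rfl]
        simpa using ih d
      · rw [if_neg hnil, List.filter_cons]
        by_cases hlen : k < qs.length
        · rw [if_pos (by simpa using hlen), List.foldl_cons, if_pos hlen]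
          rw [PySem.List.pyGetD_of_nonneg qs "" (by positivity)]
          simpa using ih _
        · rw [if_neg (by simpa using hlen), if_neg hlen]
          exact ih d

/-- Shrinking the already-shrunk active list once more. -/
theorem pvFilter_step (active : List (String × List String)) (j : Nat) :
    (active.filter (fun p => decide (j ≤ p.2.length))).filter
        (fun p => decide ((j : Int) < (p.2.length : Int))) =
      active.filter (fun p => decide (j + 1 ≤ p.2.length)) := by
  rw [List.filter_filter]
  apply List.filter_congr
  intro p _
  by_cases h : j + 1 ≤ p.2.length
  · simp [h, show ((j : Int) < (p.2.length : Int)) by exact_mod_cast h, show j ≤ p.2.length by omega]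
  · simp [h, show ¬ ((j : Int) < (p.2.length : Int)) by exact_mod_cast h]

/-- Invariant of B's window loop after `m` windows. -/
theorem pvB_run (all_sqi : List (String × List (String × List String))) :
    ∀ (m : Nat),
    ((List.range m).map (fun j => ((j : Nat) : Int))).foldl pvBStep (pvActive0 all_sqi, []) =
      ((pvActive0 all_sqi).filter (fun p => decide (m ≤ p.2.length)),
       (List.range m).map (fun k => (all_sqi.foldl (pvG k) PySem.Dict.empty).items)) := by
  intro m
  induction m with
  | zero => simp
  | succ m ih =>
    rw [List.range_succ, List.map_append, List.foldl_append, ih]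
    rw [List.map_append, List.map_singleton, List.foldl_cons, List.foldl_nil]
    unfold pvBStep
    dsimp only
    rw [pvFilter_step, pvDict_eq]
    rfl

-- ===== VERDICT (by name: the statement is the Claim_ definition above) =====
theorem build_per_window_quality_py_spec : Claim_equal_build_per_window_quality_py := by
  intro all_sqi n _
  unfold Spec_build_per_window_quality_py build_per_window_quality_py build_per_window_quality_py_alt
  have hB : ((PySem.List.pyRange 0 n 1).foldl pvBStep (pvActive0 all_sqi, [])).2 =
      (List.range n.toNat).map (fun k => (all_sqi.foldl (pvG k) PySem.Dict.empty).items) := by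
    rw [PySem.List.pyRange_one]
    simp only [zero_add, Int.sub_zero]
    rw [pvB_run all_sqi n.toNat]
  rw [hB]
  apply List.ext_getElem?
  intro k
  by_cases hk : k < n.toNat
  · have hkr : k < (PySem.List.pyRange 0 n 1).length := by
      rw [PySem.List.length_pyRange_one]; omega
    have hkn : (k : Int) < n := by omega
    rw [List.getElem?_map, List.getElem?_map, pvOuter_get n all_sqi _ k hkn, List.getElem?_map,
      List.getElem?_eq_getElem hkr, List.getElem?_eq_getElem (by simpa using hk)]
    simp
  · have h1 : (all_sqi.foldl (pvOuterStep n)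
        ((PySem.List.pyRange 0 n 1).map (fun _ => (PySem.Dict.empty : PySem.Dict String String))))[k]? = none := by
      rw [List.getElem?_eq_none]
      rw [pvOuter_len, List.length_map, PySem.List.length_pyRange_one]
      omega
    rw [List.getElem?_map, List.getElem?_map, h1,
      List.getElem?_eq_none (by simpa using Nat.le_of_not_lt hk)]
    rfl
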